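-- pv_equiv track=rewrite | github.com/jbkamp/repo-Span-Pref | esnli/analysis.py | tokenmask_to_chunkmask
-- ===== SOURCE A (Python) =====
-- def tokenmask_to_chunkmask(tokenmask, list_of_chunks_indices):
--     """
--     :param tokenmask:
--     :param list_of_chunks_indices:
--     :return:
--         tokenmask_to_chunkmask( [0,1,       0,      0,1,        1,0],
--                                 [[0,1],     [2],    [3,4],      [5,6]])
--                              >> [1,         0,      1,          1]
--     """
--     chunkmask = []
--     for chunk in list_of_chunks_indices:
--         if 1 in [tokenmask[idx] for idx in chunk]:
--             chunkmask.append(1)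
--         else:
--             chunkmask.append(0)
--     return chunkmask
-- ===== SOURCE B (Python) =====
-- def tokenmask_to_chunkmask(tokenmask, list_of_chunks_indices):
--     # Reverse map: for each token position, which chunks contain it; then one
--     # scatter pass over the tokens sets the owning chunks' bits.
--     owners = [[] for _ in tokenmask]
--     for c, chunk in enumerate(list_of_chunks_indices):
--         for idx in chunk:
--             owners[idx].append(c)
--     chunkmask = [0] * len(list_of_chunks_indices)
--     for v, own in zip(tokenmask, owners):
--         if v == 1:
--             for c in own:
--                 chunkmask[c] = 1
--     return chunkmask
-- ===== Notes on version B (the rewrite author's own statement) =====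
-- stated objective: alternative
-- what changed: Replaces the per-chunk gather (build the list of token values for each chunk and test 1-membership) by a reverse map from token position to owning chunk positions plus a single scatter pass over the tokens that sets the owning chunks' bits; Pre_ excludes only inputs where A raises IndexError (an out-of-range chunk index).
import Mathlib
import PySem

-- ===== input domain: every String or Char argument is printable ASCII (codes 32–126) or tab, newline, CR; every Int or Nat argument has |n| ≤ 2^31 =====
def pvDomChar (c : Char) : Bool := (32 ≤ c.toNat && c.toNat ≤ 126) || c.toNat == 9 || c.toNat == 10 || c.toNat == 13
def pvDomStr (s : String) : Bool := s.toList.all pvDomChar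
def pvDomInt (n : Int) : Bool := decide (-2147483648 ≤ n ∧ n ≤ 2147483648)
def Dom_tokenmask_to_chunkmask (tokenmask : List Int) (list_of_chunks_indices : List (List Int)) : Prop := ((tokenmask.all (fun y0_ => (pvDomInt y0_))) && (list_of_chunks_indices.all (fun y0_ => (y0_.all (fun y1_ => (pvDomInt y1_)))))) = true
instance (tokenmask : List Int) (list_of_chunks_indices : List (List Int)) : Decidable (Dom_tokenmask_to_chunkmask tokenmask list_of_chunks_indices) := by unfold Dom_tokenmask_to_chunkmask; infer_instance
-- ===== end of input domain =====

-- B replaces A's per-chunk gather with a reverse token-position → chunk-positions map and a single scatter pass over the tokens (alternative decomposition, same cost).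

-- ===== PORT A =====
def tokenmask_to_chunkmask (tokenmask : List Int) (list_of_chunks_indices : List (List Int)) : List Int :=
  list_of_chunks_indices.foldl
    (fun chunkmask chunk =>
      if (chunk.map (fun idx => PySem.List.pyGetD tokenmask idx 0)).contains 1
      then chunkmask ++ [1]
      else chunkmask ++ [0])
    []

-- ===== PORT B =====
-- B-side helper: the effective position of Python's list subscript `owners[idx]`
-- (negative idx counts from the end); exact on indices in range, which Pre_ guarantees.
def pvNormIdx (n : Nat) (idx : Int) : Nat := (if 0 ≤ idx then idx else idx + n).toNat

def tokenmask_to_chunkmask_alt (tokenmask : List Int) (list_of_chunks_indices : List (List Int)) : List Int :=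
  let n := tokenmask.length
  let owners :=
    (list_of_chunks_indices.foldl
      (fun (st : List (List Nat) × Nat) chunk =>
        (chunk.foldl
          (fun ow idx =>
            ow.set (pvNormIdx n idx) ((ow.getD (pvNormIdx n idx) []) ++ [st.2]))
          st.1,
        st.2 + 1))
      (List.replicate n ([] : List Nat), 0)).1
  (tokenmask.zip owners).foldl
    (fun m p => if p.1 = 1 then p.2.foldl (fun m k => m.set k (1 : Int)) m else m)
    (List.replicate list_of_chunks_indices.length (0 : Int))

-- ===== PRECONDITION & SPEC =====
-- Pre_ excludes exactly the inputs on which A raises IndexError: some chunk index out of range for tokenmask.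
def Pre_tokenmask_to_chunkmask (tokenmask : List Int) (list_of_chunks_indices : List (List Int)) : Prop :=
  ∀ chunk ∈ list_of_chunks_indices, ∀ idx ∈ chunk, PySem.Raise.InRange tokenmask.length idx
instance (tokenmask : List Int) (list_of_chunks_indices : List (List Int)) : Decidable (Pre_tokenmask_to_chunkmask tokenmask list_of_chunks_indices) := by unfold Pre_tokenmask_to_chunkmask; infer_instance
def pvWitness_tokenmask_to_chunkmask : List Int × List (List Int) :=
  ([0, 1, 0, 0, 1, 1, 0], [[0, 1], [2], [3, 4], [5, 6]])
def Spec_tokenmask_to_chunkmask (tokenmask : List Int) (list_of_chunks_indices : List (List Int)) (out : List Int) : Prop := out = tokenmask_to_chunkmask_alt tokenmask list_of_chunks_indices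
instance (tokenmask : List Int) (list_of_chunks_indices : List (List Int)) (out : List Int) : Decidable (Spec_tokenmask_to_chunkmask tokenmask list_of_chunks_indices out) := by unfold Spec_tokenmask_to_chunkmask; infer_instance

-- ===== CLAIM (what is proved, stated in full; the proofs are below) =====
def Claim_equal_tokenmask_to_chunkmask : Prop := ∀ (tokenmask : List Int) (list_of_chunks_indices : List (List Int)), Dom_tokenmask_to_chunkmask tokenmask list_of_chunks_indices → Pre_tokenmask_to_chunkmask tokenmask list_of_chunks_indices → Spec_tokenmask_to_chunkmask tokenmask list_of_chunks_indices (tokenmask_to_chunkmask tokenmask list_of_chunks_indices)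

-- ===== LEMMAS AND PROOFS =====

lemma foldl_if_append {α : Type} (p : α → Bool) :
  ∀ (ls : List α) (acc : List Int),
    ls.foldl (fun acc x => if p x then acc ++ [1] else acc ++ [0]) acc
      = acc ++ ls.map (fun x => if p x then (1:Int) else 0)
  | [], acc => by simp
  | x :: ls, acc => by
      simp only [List.foldl_cons, List.map_cons]
      rw [foldl_if_append p ls]
      by_cases h : p x <;> simp [h]

lemma setOnes_length (L : List Nat) : ∀ (m : List Int),
    (L.foldl (fun m k => m.set k (1 : Int)) m).length = m.length := by
  induction L with
  | nil => intro m; simp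
  | cons k L ih => intro m; simp only [List.foldl_cons]; rw [ih]; simp

lemma setOnes_getElem (L : List Nat) : ∀ (m : List Int) (j : Nat) (hj : j < m.length),
    (L.foldl (fun m k => m.set k (1 : Int)) m)[j]'(by rw [setOnes_length]; exact hj)
      = if j ∈ L then 1 else m[j] := by
  induction L with
  | nil => intro m j hj; simp
  | cons k L ih =>
      intro m j hj
      simp only [List.foldl_cons]
      rw [ih (m.set k 1) j (by simpa using hj)]
      by_cases hk : j = k
      · subst hk; simp
      · by_cases hL : j ∈ L <;> simp [hL, hk, Ne.symm hk, List.mem_cons]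

lemma pvNormIdx_lt (len : Nat) (idx : Int) (h : PySem.Raise.InRange len idx) :
    pvNormIdx len idx < len := by
  simp [PySem.Raise.InRange] at h
  unfold pvNormIdx
  split <;> omega

lemma pyGetD_norm (tm : List Int) (idx : Int)
    (h : PySem.Raise.InRange tm.length idx) :
    PySem.List.pyGetD tm idx 0 = tm[pvNormIdx tm.length idx]'(pvNormIdx_lt _ _ h) := by
  simp [PySem.Raise.InRange] at h
  by_cases h0 : 0 ≤ idx
  · rw [PySem.List.pyGetD_eq_getElem tm 0 h0 (by exact_mod_cast h.2)]
    simp [pvNormIdx, h0]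
  · have hk : idx = -(((-idx).toNat : Nat) : Int) := by omega
    conv_lhs => rw [hk]
    rw [PySem.List.pyGetD_neg_natCast tm (-idx).toNat 0 (by omega) (by omega)]
    exact getElem_congr rfl (by unfold pvNormIdx; split <;> omega) _

lemma chunkFold_length (n : Nat) (c : Nat) : ∀ (chunk : List Int) (ow : List (List Nat)),
    (chunk.foldl (fun ow idx => ow.set (pvNormIdx n idx) ((ow.getD (pvNormIdx n idx) []) ++ [c])) ow).length
      = ow.length := by
  intro chunk
  induction chunk with
  | nil => intro ow; simp
  | cons idx rest ih => intro ow; simp only [List.foldl_cons]; rw [ih]; simp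

lemma chunkFold_mem (n : Nat) (c : Nat) : ∀ (chunk : List Int) (ow : List (List Nat)),
    (∀ idx ∈ chunk, pvNormIdx n idx < ow.length) →
    ∀ (j : Nat) (hj : j < ow.length) (c' : Nat),
    (c' ∈ (chunk.foldl (fun ow idx => ow.set (pvNormIdx n idx) ((ow.getD (pvNormIdx n idx) []) ++ [c])) ow)[j]'(by rw [chunkFold_length]; exact hj)
      ↔ c' ∈ ow[j] ∨ (c' = c ∧ ∃ idx ∈ chunk, pvNormIdx n idx = j)) := by
  intro chunk
  induction chunk with
  | nil => intro ow _ j hj c'; simp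
  | cons idx rest ih =>
      intro ow hin j hj c'
      simp only [List.foldl_cons]
      have hi : pvNormIdx n idx < ow.length := hin idx (by simp)
      rw [ih (ow.set (pvNormIdx n idx) ((ow.getD (pvNormIdx n idx) []) ++ [c]))
            (by intro i hi'; simpa using hin i (by simp [hi']))
            j (by simpa using hj) c']
      rw [List.getElem_set]
      by_cases he : pvNormIdx n idx = j
      · subst he
        rw [if_pos rfl, List.getD_eq_getElem ow [] hi]
        constructor
        · rintro (h | h)
          · rcases List.mem_append.mp h with h | h
            · exact Or.inl h
            · simp at h; exact Or.inr ⟨h, idx, by simp⟩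
          · rcases h with ⟨hc, i, hmem, hnorm⟩
            exact Or.inr ⟨hc, i, List.mem_cons_of_mem _ hmem, hnorm⟩
        · rintro (h | ⟨hc, i, hmem, hnorm⟩)
          · exact Or.inl (List.mem_append.mpr (Or.inl h))
          · rcases List.mem_cons.mp hmem with rfl | hmem
            · exact Or.inl (List.mem_append.mpr (Or.inr (by simp [hc])))
            · exact Or.inr ⟨hc, i, hmem, hnorm⟩
      · rw [if_neg he]
        constructor
        · rintro (h | ⟨hc, i, hmem, hnorm⟩)
          · exact Or.inl h
          · exact Or.inr ⟨hc, i, List.mem_cons_of_mem _ hmem, hnorm⟩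
        · rintro (h | ⟨hc, i, hmem, hnorm⟩)
          · exact Or.inl h
          · rcases List.mem_cons.mp hmem with rfl | hmem
            · exact absurd hnorm he
            · exact Or.inr ⟨hc, i, hmem, hnorm⟩

lemma ownersFold_length (n : Nat) : ∀ (ls : List (List Int)) (ow : List (List Nat)) (c : Nat),
    ((ls.foldl
      (fun (st : List (List Nat) × Nat) chunk =>
        (chunk.foldl
          (fun ow idx =>
            ow.set (pvNormIdx n idx) ((ow.getD (pvNormIdx n idx) []) ++ [st.2]))
          st.1,
        st.2 + 1))
      (ow, c)).1.length = ow.length) := by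
  intro ls
  induction ls with
  | nil => intro ow c; simp
  | cons chunk rest ih =>
      intro ow c
      simp only [List.foldl_cons]
      rw [ih]
      exact chunkFold_length n c chunk ow

lemma ownersFold_mem (n : Nat) : ∀ (ls : List (List Int)) (ow : List (List Nat)) (c : Nat),
    (∀ chunk ∈ ls, ∀ idx ∈ chunk, pvNormIdx n idx < ow.length) →
    ∀ (j : Nat) (hj : j < ow.length) (c' : Nat),
      (c' ∈ ((ls.foldl
      (fun (st : List (List Nat) × Nat) chunk =>
        (chunk.foldl
          (fun ow idx =>
            ow.set (pvNormIdx n idx) ((ow.getD (pvNormIdx n idx) []) ++ [st.2]))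
          st.1,
        st.2 + 1))
      (ow, c)).1[j]'(by rw [ownersFold_length]; exact hj))
      ↔ c' ∈ ow[j] ∨ ∃ k, k < ls.length ∧ c' = c + k ∧ ∃ idx ∈ ls[k]!, pvNormIdx n idx = j) := by
  intro ls
  induction ls with
  | nil => intro ow c _ j hj c'; simp
  | cons chunk rest ih =>
      intro ow c hin j hj c'
      simp only [List.foldl_cons]
      rw [ih (chunk.foldl
          (fun ow idx =>
            ow.set (pvNormIdx n idx) ((ow.getD (pvNormIdx n idx) []) ++ [c]))
          ow) (c + 1)
          (by intro ch hch i hi; rw [chunkFold_length]; exact hin ch (List.mem_cons_of_mem _ hch) i hi)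
          j (by rw [chunkFold_length]; exact hj) c']
      rw [chunkFold_mem n c chunk ow (fun i hi => hin chunk (by simp) i hi) j hj c']
      constructor
      · rintro ((h | ⟨hc, i, hmem, hnorm⟩) | ⟨k, hk, hck, i, hmem, hnorm⟩)
        · exact Or.inl h
        · exact Or.inr ⟨0, by simp, by omega, i, by simpa using hmem, hnorm⟩
        · refine Or.inr ⟨k + 1, by simpa using hk, by omega, i, ?_, hnorm⟩
          have : (chunk :: rest)[k+1]! = rest[k]! := by
            simp
          rw [this]; exact hmem
      · rintro (h | ⟨k, hk, hck, i, hmem, hnorm⟩)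
        · exact Or.inl (Or.inl h)
        · cases k with
          | zero =>
              refine Or.inl (Or.inr ⟨by omega, i, ?_, hnorm⟩)
              have : (chunk :: rest)[0]! = chunk := by
                simp
              rw [this] at hmem; exact hmem
          | succ k =>
              refine Or.inr ⟨k, by simpa using hk, by omega, i, ?_, hnorm⟩
              have : (chunk :: rest)[k+1]! = rest[k]! := by
                simp
              rw [this] at hmem; exact hmem

lemma scatter_length (zs : List (Int × List Nat)) : ∀ (m : List Int),
    (zs.foldl (fun m p => if p.1 = 1 then p.2.foldl (fun m k => m.set k (1 : Int)) m else m) m).length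
      = m.length := by
  induction zs with
  | nil => intro m; simp
  | cons p zs ih =>
      intro m
      simp only [List.foldl_cons]
      rw [ih]
      split
      · exact setOnes_length p.2 m
      · rfl

lemma scatter_getElem (zs : List (Int × List Nat)) : ∀ (m : List Int) (j : Nat) (hj : j < m.length),
    (zs.foldl (fun m p => if p.1 = 1 then p.2.foldl (fun m k => m.set k (1 : Int)) m else m) m)[j]'(by rw [scatter_length]; exact hj)
      = if ∃ p ∈ zs, p.1 = 1 ∧ j ∈ p.2 then 1 else m[j] := by
  induction zs with
  | nil => intro m j hj; simp
  | cons p zs ih =>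
      intro m j hj
      simp only [List.foldl_cons]
      by_cases hp : p.1 = 1
      · simp only [if_pos hp]
        rw [ih _ j (by rw [setOnes_length]; exact hj)]
        rw [setOnes_getElem p.2 m j hj]
        by_cases h1 : ∃ q ∈ zs, q.1 = 1 ∧ j ∈ q.2
        · rw [if_pos h1, if_pos ⟨h1.choose, List.mem_cons_of_mem _ h1.choose_spec.1, h1.choose_spec.2⟩]
        · rw [if_neg h1]
          by_cases h2 : j ∈ p.2
          · rw [if_pos h2, if_pos ⟨p, by simp, hp, h2⟩]
          · rw [if_neg h2, if_neg ?_]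
            rintro ⟨q, hq, hq1, hq2⟩
            rcases List.mem_cons.mp hq with rfl | hq
            · exact h2 hq2
            · exact h1 ⟨q, hq, hq1, hq2⟩
      · simp only [if_neg hp]
        rw [ih m j hj]
        by_cases h1 : ∃ q ∈ zs, q.1 = 1 ∧ j ∈ q.2
        · rw [if_pos h1, if_pos ⟨h1.choose, List.mem_cons_of_mem _ h1.choose_spec.1, h1.choose_spec.2⟩]
        · rw [if_neg h1, if_neg ?_]
          rintro ⟨q, hq, hq1, hq2⟩
          rcases List.mem_cons.mp hq with rfl | hq
          · exact hp hq1
          · exact h1 ⟨q, hq, hq1, hq2⟩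

-- A = B on Pre_: A's fold is the per-chunk membership map; B's scatter result is characterised pointwise.
lemma ports_agree (tm : List Int) (ls : List (List Int))
    (hpre : ∀ chunk ∈ ls, ∀ idx ∈ chunk, PySem.Raise.InRange tm.length idx) :
    tokenmask_to_chunkmask tm ls = tokenmask_to_chunkmask_alt tm ls := by
  have hA : tokenmask_to_chunkmask tm ls
      = ls.map (fun chunk =>
          if (chunk.map (fun idx => PySem.List.pyGetD tm idx 0)).contains 1 then (1 : Int) else 0) := by
    unfold tokenmask_to_chunkmask
    rw [foldl_if_append (fun chunk => (chunk.map (fun idx => PySem.List.pyGetD tm idx 0)).contains 1) ls []]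
    simp
  have hB : tokenmask_to_chunkmask_alt tm ls
      = (tm.zip ((ls.foldl
          (fun (st : List (List Nat) × Nat) chunk =>
            (chunk.foldl
              (fun ow idx =>
                ow.set (pvNormIdx tm.length idx) ((ow.getD (pvNormIdx tm.length idx) []) ++ [st.2]))
              st.1,
            st.2 + 1))
          (List.replicate tm.length ([] : List Nat), 0)).1)).foldl
        (fun m p => if p.1 = 1 then p.2.foldl (fun m k => m.set k (1 : Int)) m else m)
        (List.replicate ls.length (0 : Int)) := by rfl
  set O := (ls.foldl
          (fun (st : List (List Nat) × Nat) chunk =>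
            (chunk.foldl
              (fun ow idx =>
                ow.set (pvNormIdx tm.length idx) ((ow.getD (pvNormIdx tm.length idx) []) ++ [st.2]))
              st.1,
            st.2 + 1))
          (List.replicate tm.length ([] : List Nat), 0)).1 with hO
  have hhin : ∀ chunk ∈ ls, ∀ idx ∈ chunk,
      pvNormIdx tm.length idx < (List.replicate tm.length ([] : List Nat)).length := by
    intro chunk hc idx hi
    rw [List.length_replicate]
    exact pvNormIdx_lt _ _ (hpre chunk hc idx hi)
  have hOlen : O.length = tm.length := by
    rw [hO, ownersFold_length]; simp
  have hOmem : ∀ (i : Nat) (hi : i < tm.length) (c' : Nat),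
      c' ∈ O.getD i [] ↔ ∃ k, k < ls.length ∧ c' = k ∧ ∃ idx ∈ ls[k]!, pvNormIdx tm.length idx = i := by
    intro i hi c'
    rw [List.getD_eq_getElem O [] (by omega)]
    have h2 := ownersFold_mem tm.length ls (List.replicate tm.length ([] : List Nat)) 0 hhin i (by simpa using hi) c'
    simp only [List.getElem_replicate, List.mem_nil_iff, false_or, Nat.zero_add] at h2
    exact h2.trans (by simp)
  rw [hA, hB]
  apply List.ext_getElem
  · rw [scatter_length]; simp
  · intro j hj1 hj2
    have hjls : j < ls.length := by simpa using hj1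
    rw [List.getElem_map]
    rw [scatter_getElem (tm.zip O) (List.replicate ls.length (0:Int)) j (by simpa using hjls)]
    have hkey : ((ls[j]'hjls).map (fun idx => PySem.List.pyGetD tm idx 0)).contains 1 = true
        ↔ ∃ p ∈ tm.zip O, p.1 = 1 ∧ j ∈ p.2 := by
      rw [List.contains_iff_mem, List.mem_map]
      constructor
      · rintro ⟨idx, hmem, hval⟩
        have hin : PySem.Raise.InRange tm.length idx :=
          hpre _ (List.getElem_mem hjls) idx hmem
        have hi : pvNormIdx tm.length idx < tm.length := pvNormIdx_lt _ _ hin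
        refine ⟨(tm[pvNormIdx tm.length idx]'hi, O[pvNormIdx tm.length idx]'(by omega)), ?_, ?_, ?_⟩
        · rw [List.mem_iff_getElem]
          refine ⟨pvNormIdx tm.length idx, by simp [List.length_zip]; omega, ?_⟩
          rw [List.getElem_zip]
        · show tm[pvNormIdx tm.length idx]'hi = 1
          rw [← pyGetD_norm tm idx hin]; exact hval
        · show j ∈ O[pvNormIdx tm.length idx]'(by omega)
          rw [← List.getD_eq_getElem O [] (by omega), hOmem _ hi j]
          exact ⟨j, hjls, rfl, idx, by rw [getElem!_pos ls j hjls]; exact hmem, rfl⟩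
      · rintro ⟨p, hpz, hp1, hp2⟩
        rw [List.mem_iff_getElem] at hpz
        rcases hpz with ⟨i, hiz, hpe⟩
        have hi : i < tm.length := by simp [List.length_zip] at hiz; omega
        rw [List.getElem_zip] at hpe
        subst hpe
        simp only at hp1 hp2
        rw [show O[i]'(by omega) = O.getD i [] from (List.getD_eq_getElem O [] (by omega)).symm, hOmem i hi j] at hp2
        rcases hp2 with ⟨k, hk, rfl, idx, hmem, hnorm⟩
        rw [getElem!_pos ls _ hk] at hmem
        have hin : PySem.Raise.InRange tm.length idx :=
          hpre _ (List.getElem_mem hk) idx hmem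
        refine ⟨idx, hmem, ?_⟩
        rw [pyGetD_norm tm idx hin]
        rw [← hp1]
        exact getElem_congr rfl hnorm _
    by_cases hc : ∃ p ∈ tm.zip O, p.1 = 1 ∧ j ∈ p.2
    · rw [if_pos (hkey.mpr hc), if_pos hc]
    · rw [if_neg (fun h => hc (hkey.mp h)), if_neg hc]
      simp

-- ===== VERDICT (by name: the statement is the Claim_ definition above) =====
theorem tokenmask_to_chunkmask_spec : Claim_equal_tokenmask_to_chunkmask := by
  intro tokenmask list_of_chunks_indices _ hpre
  unfold Spec_tokenmask_to_chunkmask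
  exact ports_agree tokenmask list_of_chunks_indices hpre
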